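-- pv_equiv track=rewrite | github.com/DankiLiu/dliu-ds-ma | data/massive/data_processing.py | annot_utt_to_labels
-- ===== SOURCE A (Python) =====
-- def annot_utt_to_labels(annot_utt):
--     text, labels = [], []
--     ann_text, ann_label = False, False  # if both false, not in annotation range
--     special_chars = ["[", "]", ":", " "]
--     cur_text, cur_label = "", ""
--     buffer = ""
--
--     for i, char in enumerate(annot_utt):
--         # add the char into buffer as long as it is not special character
--         if char not in special_chars:
--             buffer += char
--             if i == len(annot_utt) - 1 and buffer != "":
--                 cur_text = buffer
--                 cur_label = 'O'
--             continue
--         if char == "[":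
--             ann_label = True
--             ann_text = False
--             continue
--         if char == ":" and (ann_text or ann_label):
--             ann_label = False
--             ann_text = True
--             continue
--         if char == "]" and (ann_text or ann_label):
--             if buffer != "":
--                 cur_text = buffer
--                 buffer = ""
--             ann_text = False
--             continue
--         if char == " ":
--             if buffer != "":
--                 if ann_label:
--                     cur_label = buffer
--                 elif ann_text:
--                     cur_text = buffer
--                 else:
--                     cur_text = buffer
--                     cur_label = 'O'
--                 buffer = ""
--         if cur_text != "" and cur_label != "":
--             text.append(cur_text)
--             labels.append(cur_label)
--             cur_text = ""
--             if not (ann_text or ann_label):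
--                 cur_label = 'O'
--     if cur_text != "" and cur_label != "":
--         text.append(cur_text)
--         labels.append(cur_label)
--     assert len(text) == len(labels)
--
--     text.insert(0, "BOS")
--     text.append("EOS")
--     labels.insert(0, "[CLS]")
--     labels.append("[SEP]")
--     return text, labels
-- ===== SOURCE B (Python) =====
-- SPECIAL = ('[', ']', ':', ' ')
--
--
-- def tokenize(s):
--     """Split s into tokens: each special char alone, maximal plain runs otherwise."""
--     tokens = []
--     i, n = 0, len(s)
--     while i < n:
--         if s[i] in SPECIAL:
--             tokens.append(s[i])
--             i += 1
--         else:
--             j = i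
--             while j < n and s[j] not in SPECIAL:
--                 j += 1
--             tokens.append(s[i:j])
--             i = j
--     return tokens
--
--
-- def annot_utt_to_labels(annot_utt):
--     # Token-level parser: a mode machine ('O' plain text, 'L' reading an
--     # annotation label, 'T' reading annotated text) folded over the tokens.
--     tokens = tokenize(annot_utt)
--     mode = 'O'
--     buf, cur_t, cur_l = '', '', ''
--     text, labels = [], []
--     for tok in tokens:
--         if tok not in SPECIAL:           # word fragment
--             buf += tok
--         elif tok == '[':                 # annotation opens: a label comes next
--             mode = 'L'
--         elif tok == ':' and mode != 'O':  # label done, annotated text follows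
--             mode = 'T'
--         elif tok == ']' and mode != 'O':  # annotation closes
--             if buf:
--                 cur_t, buf = buf, ''
--             if mode == 'T':
--                 mode = 'O'
--         else:                            # a separator: flush the buffer, emit
--             if tok == ' ' and buf:
--                 if mode == 'L':
--                     cur_l, buf = buf, ''
--                 elif mode == 'T':
--                     cur_t, buf = buf, ''
--                 else:
--                     cur_t, cur_l, buf = buf, 'O', ''
--             if cur_t and cur_l:
--                 text.append(cur_t)
--                 labels.append(cur_l)
--                 cur_t = ''
--                 if mode == 'O':
--                     cur_l = 'O'
--     if tokens and tokens[-1] not in SPECIAL: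
--         # input ends in the middle of a word: take the fragment as a plain word
--         text.append(buf)
--         labels.append('O')
--     elif cur_t and cur_l:
--         text.append(cur_t)
--         labels.append(cur_l)
--     assert len(text) == len(labels)
--     return ['BOS'] + text + ['EOS'], ['[CLS]'] + labels + ['[SEP]']
-- ===== Notes on version B (the rewrite author's own statement) =====
-- stated objective: alternative
-- what changed: Replaces A's char-by-char flag automaton (per-index last-character check inside the loop) with a two-phase parser: a tokenizer producing special-char and maximal word-run tokens, then a three-mode machine folded over the tokens with a single end-of-input rule (a trailing word fragment is a plain 'O' word).
import Mathlib
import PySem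

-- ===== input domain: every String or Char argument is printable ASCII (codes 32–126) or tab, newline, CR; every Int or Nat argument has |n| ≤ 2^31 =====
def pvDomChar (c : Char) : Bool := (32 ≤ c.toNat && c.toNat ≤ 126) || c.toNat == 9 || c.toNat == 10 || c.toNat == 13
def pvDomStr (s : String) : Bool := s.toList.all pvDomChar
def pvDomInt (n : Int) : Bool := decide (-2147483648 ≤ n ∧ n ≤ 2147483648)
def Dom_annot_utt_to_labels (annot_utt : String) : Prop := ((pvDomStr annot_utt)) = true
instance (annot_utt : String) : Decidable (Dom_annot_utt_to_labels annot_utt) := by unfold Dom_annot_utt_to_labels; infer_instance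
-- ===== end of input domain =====

-- B re-implements A's char-by-char automaton as a tokenizer (special chars / maximal word
-- runs) plus a token-level three-mode machine; objective: alternative decomposition, same output.

def pvSpecial (c : Char) : Bool := c == '[' || c == ']' || c == ':' || c == ' '

-- ===== PORT A =====
-- A's loop state: output lists, the two annotation flags, current text/label, char buffer.
structure PvStA where
  text : List (List Char)
  labels : List (List Char)
  annText : Bool
  annLabel : Bool
  curText : List Char
  curLabel : List Char
  buffer : List Char
deriving Repr, DecidableEq

def pvStepA (n : Int) (s : PvStA) (ic : Int × Char) : PvStA :=
  let i := ic.1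
  let c := ic.2
  if ¬ pvSpecial c then
    let buffer := s.buffer ++ [c]
    if i = n - 1 ∧ buffer ≠ [] then
      { s with buffer := buffer, curText := buffer, curLabel := ['O'] }
    else { s with buffer := buffer }
  else if c = '[' then { s with annLabel := true, annText := false }
  else if c = ':' ∧ (s.annText ∨ s.annLabel) then { s with annLabel := false, annText := true }
  else if c = ']' ∧ (s.annText ∨ s.annLabel) then
    let s1 := if s.buffer ≠ [] then { s with curText := s.buffer, buffer := ([] : List Char) } else s
    { s1 with annText := false }
  else
    let s1 :=
      if c = ' ' ∧ s.buffer ≠ [] then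
        (if s.annLabel then { s with curLabel := s.buffer, buffer := ([] : List Char) }
         else if s.annText then { s with curText := s.buffer, buffer := ([] : List Char) }
         else { s with curText := s.buffer, curLabel := ['O'], buffer := ([] : List Char) })
      else s
    if s1.curText ≠ [] ∧ s1.curLabel ≠ [] then
      { s1 with text := s1.text ++ [s1.curText], labels := s1.labels ++ [s1.curLabel],
                curText := ([] : List Char),
                curLabel := if ¬ (s1.annText ∨ s1.annLabel) then ['O'] else s1.curLabel }
    else s1

def annot_utt_to_labels (annot_utt : String) : List String × List String :=
  let chars := annot_utt.toList
  let n : Int := chars.length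
  let s := (PySem.List.enumerate chars).foldl (pvStepA n) ⟨[], [], false, false, [], [], []⟩
  let s :=
    if s.curText ≠ [] ∧ s.curLabel ≠ [] then
      { s with text := s.text ++ [s.curText], labels := s.labels ++ [s.curLabel] }
    else s
  ("BOS" :: s.text.map (fun w => String.ofList w) ++ ["EOS"],
   "[CLS]" :: s.labels.map (fun w => String.ofList w) ++ ["[SEP]"])

-- ===== PORT B =====
inductive PvMode
  | O | L | T
deriving Repr, DecidableEq

structure PvStB where
  mode : PvMode
  buf : List Char
  curT : List Char
  curL : List Char
  text : List (List Char)
  labels : List (List Char)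
deriving Repr, DecidableEq

-- Source B's tokenize: each special char is its own token, maximal plain runs are word tokens.
def pvTokenize : List Char → List (List Char)
  | [] => []
  | c :: cs =>
    if pvSpecial c then [c] :: pvTokenize cs
    else (c :: cs.takeWhile (fun d => !pvSpecial d)) :: pvTokenize (cs.dropWhile (fun d => !pvSpecial d))
termination_by l => l.length
decreasing_by
  · simp
  · have := List.length_dropWhile_le (fun d => !pvSpecial d) cs
    simp
    omega

def pvStepB (s : PvStB) (tok : List Char) : PvStB :=
  if tok ≠ ['['] ∧ tok ≠ [']'] ∧ tok ≠ [':'] ∧ tok ≠ [' '] then { s with buf := s.buf ++ tok }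
  else if tok = ['['] then { s with mode := PvMode.L }
  else if tok = [':'] ∧ s.mode ≠ PvMode.O then { s with mode := PvMode.T }
  else if tok = [']'] ∧ s.mode ≠ PvMode.O then
    let s1 := if s.buf ≠ [] then { s with curT := s.buf, buf := ([] : List Char) } else s
    if s1.mode = PvMode.T then { s1 with mode := PvMode.O } else s1
  else
    let s1 :=
      if tok = [' '] ∧ s.buf ≠ [] then
        (match s.mode with
         | PvMode.L => { s with curL := s.buf, buf := ([] : List Char) }
         | PvMode.T => { s with curT := s.buf, buf := ([] : List Char) }
         | PvMode.O => { s with curT := s.buf, curL := ['O'], buf := ([] : List Char) })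
      else s
    if s1.curT ≠ [] ∧ s1.curL ≠ [] then
      { s1 with text := s1.text ++ [s1.curT], labels := s1.labels ++ [s1.curL],
                curT := ([] : List Char),
                curL := if s1.mode = PvMode.O then ['O'] else s1.curL }
    else s1

-- Source B's trailing step: a final word fragment is a plain 'O' word, else emit the pending pair.
def pvFinishB (s : PvStB) (lastTok? : Option (List Char)) : PvStB :=
  match lastTok? with
  | some t =>
    if t ≠ ['['] ∧ t ≠ [']'] ∧ t ≠ [':'] ∧ t ≠ [' '] then
      { s with text := s.text ++ [s.buf], labels := s.labels ++ [['O']] }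
    else if s.curT ≠ [] ∧ s.curL ≠ [] then
      { s with text := s.text ++ [s.curT], labels := s.labels ++ [s.curL] }
    else s
  | none =>
    if s.curT ≠ [] ∧ s.curL ≠ [] then
      { s with text := s.text ++ [s.curT], labels := s.labels ++ [s.curL] }
    else s

def annot_utt_to_labels_alt (annot_utt : String) : List String × List String :=
  let toks := pvTokenize annot_utt.toList
  let s := toks.foldl pvStepB ⟨PvMode.O, [], [], [], [], []⟩
  let s := pvFinishB s toks.getLast?
  ("BOS" :: s.text.map (fun w => String.ofList w) ++ ["EOS"],
   "[CLS]" :: s.labels.map (fun w => String.ofList w) ++ ["[SEP]"])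

-- ===== PRECONDITION & SPEC =====
def Spec_annot_utt_to_labels (annot_utt : String) (out : List String × List String) : Prop := out = annot_utt_to_labels_alt annot_utt
instance (annot_utt : String) (out : List String × List String) : Decidable (Spec_annot_utt_to_labels annot_utt out) := by unfold Spec_annot_utt_to_labels; infer_instance

-- ===== CLAIM (what is proved, stated in full; the proofs are below) =====
def Claim_equal_annot_utt_to_labels : Prop := ∀ (annot_utt : String), Dom_annot_utt_to_labels annot_utt → Spec_annot_utt_to_labels annot_utt (annot_utt_to_labels annot_utt)

-- ===== LEMMAS AND PROOFS =====

-- A's per-char step with the "last index" rule stripped out.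
def pvStepA' (s : PvStA) (c : Char) : PvStA :=
  if ¬ pvSpecial c then { s with buffer := s.buffer ++ [c] }
  else if c = '[' then { s with annLabel := true, annText := false }
  else if c = ':' ∧ (s.annText ∨ s.annLabel) then { s with annLabel := false, annText := true }
  else if c = ']' ∧ (s.annText ∨ s.annLabel) then
    let s1 := if s.buffer ≠ [] then { s with curText := s.buffer, buffer := ([] : List Char) } else s
    { s1 with annText := false }
  else
    let s1 :=
      if c = ' ' ∧ s.buffer ≠ [] then
        (if s.annLabel then { s with curLabel := s.buffer, buffer := ([] : List Char) }
         else if s.annText then { s with curText := s.buffer, buffer := ([] : List Char) }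
         else { s with curText := s.buffer, curLabel := ['O'], buffer := ([] : List Char) })
      else s
    if s1.curText ≠ [] ∧ s1.curLabel ≠ [] then
      { s1 with text := s1.text ++ [s1.curText], labels := s1.labels ++ [s1.curLabel],
                curText := ([] : List Char),
                curLabel := if ¬ (s1.annText ∨ s1.annLabel) then ['O'] else s1.curLabel }
    else s1

-- Map B's state onto A's (the mode encodes A's two flags; (true,true) is unreachable).
def pvEmbed (s : PvStB) : PvStA :=
  ⟨s.text, s.labels, s.mode = PvMode.T, s.mode = PvMode.L, s.curT, s.curL, s.buf⟩

theorem pvStepA_eq_of_special (n : Int) (s : PvStA) (i : Int) (c : Char)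
    (h : pvSpecial c = true) : pvStepA n s (i, c) = pvStepA' s c := by
  simp [pvStepA, pvStepA', h]

theorem pvStepA_eq_of_ne (n : Int) (s : PvStA) (i : Int) (c : Char)
    (h : i ≠ n - 1) : pvStepA n s (i, c) = pvStepA' s c := by
  by_cases hc : pvSpecial c = true
  · exact pvStepA_eq_of_special n s i c hc
  · simp [pvStepA, pvStepA', hc, h]

-- The last-index rule ≡ a post-pass override when the last char is non-special.
def pvOverride (s : PvStA) (last? : Option Char) : PvStA :=
  match last? with
  | some c => if ¬ pvSpecial c then { s with curText := s.buffer, curLabel := ['O'] } else s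
  | none => s

theorem pvEnumSplit : ∀ (l : List Char) (k n : Int) (s : PvStA), k + l.length = n →
    (PySem.List.enumerate l k).foldl (pvStepA n) s = pvOverride (l.foldl pvStepA' s) l.getLast?
  | [], k, n, s, _ => by simp [PySem.List.enumerate, pvOverride]
  | c :: cs, k, n, s, hk => by
    rw [PySem.List.enumerate_cons]
    cases cs with
    | nil =>
      have hk1 : k = n - 1 := by simp at hk; omega
      simp only [List.foldl_cons, List.foldl_nil, PySem.List.enumerate_nil, pvOverride,
        List.getLast?_singleton]
      by_cases hc : pvSpecial c = true
      · rw [pvStepA_eq_of_special n s k c hc]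
        simp [hc]
      · simp only [pvStepA, pvStepA', hc]
        simp [hk1]
    | cons d ds =>
      have hne : k ≠ n - 1 := by simp at hk; omega
      rw [List.foldl_cons, pvStepA_eq_of_ne n s k c hne,
        pvEnumSplit (d :: ds) (k + 1) n (pvStepA' s c) (by simp at hk ⊢; omega)]
      simp [List.getLast?_cons_cons]

-- A run of non-special chars only appends to the buffer.
theorem pvWordRun : ∀ (w : List Char) (s : PvStA), (∀ c ∈ w, pvSpecial c = false) →
    w.foldl pvStepA' s = { s with buffer := s.buffer ++ w }
  | [], s, _ => by simp
  | c :: cs, s, h => by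
    have hc : pvSpecial c = false := h c (by simp)
    rw [List.foldl_cons]
    have h1 : pvStepA' s c = { s with buffer := s.buffer ++ [c] } := by simp [pvStepA', hc]
    rw [h1, pvWordRun cs _ (fun d hd => h d (by simp [hd]))]
    simp

-- One special char: A's step simulates B's step on the single-char token.
theorem pvSpecialStep (c : Char) (s : PvStB) (h : pvSpecial c = true) :
    pvStepA' (pvEmbed s) c = pvEmbed (pvStepB s [c]) := by
  have hc : c = '[' ∨ c = ']' ∨ c = ':' ∨ c = ' ' := by
    simp [pvSpecial, Bool.or_eq_true, beq_iff_eq] at h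
    tauto
  obtain ⟨mode, buf, curT, curL, text, labels⟩ := s
  rcases hc with rfl | rfl | rfl | rfl <;> cases mode <;>
    simp [pvStepA', pvStepB, pvEmbed, pvSpecial] <;> split_ifs <;> simp_all

-- One word token.
theorem pvWordStep (w : List Char) (s : PvStB) (hne : w ≠ [])
    (h : ∀ c ∈ w, pvSpecial c = false) :
    w.foldl pvStepA' (pvEmbed s) = pvEmbed (pvStepB s w) := by
  have hlb : w ≠ ['['] := by rintro rfl; exact absurd (h '[' (by simp)) (by decide)
  have hrb : w ≠ [']'] := by rintro rfl; exact absurd (h ']' (by simp)) (by decide)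
  have hco : w ≠ [':'] := by rintro rfl; exact absurd (h ':' (by simp)) (by decide)
  have hsp : w ≠ [' '] := by rintro rfl; exact absurd (h ' ' (by simp)) (by decide)
  rw [pvWordRun w _ h]
  simp [pvStepB, hlb, hrb, hco, hsp, pvEmbed]

-- Main simulation: the char automaton equals the token machine through pvEmbed.
theorem pvMain : ∀ (l : List Char) (s : PvStB),
    l.foldl pvStepA' (pvEmbed s) = pvEmbed ((pvTokenize l).foldl pvStepB s)
  | [], s => by simp [pvTokenize]
  | c :: cs, s => by
    by_cases hc : pvSpecial c = true
    · rw [pvTokenize]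
      simp only [hc, if_true, List.foldl_cons]
      rw [pvSpecialStep c s hc, pvMain cs (pvStepB s [c])]
    · have hsplit : c :: cs =
          (c :: cs.takeWhile (fun d => !pvSpecial d)) ++ cs.dropWhile (fun d => !pvSpecial d) := by
        simp [List.takeWhile_append_dropWhile]
      have hword : ∀ d ∈ c :: cs.takeWhile (fun d => !pvSpecial d), pvSpecial d = false := by
        intro d hd
        rcases List.mem_cons.mp hd with rfl | hd
        · simpa using hc
        · have := List.mem_takeWhile_imp hd
          simpa using this
      conv_lhs => rw [hsplit]
      rw [List.foldl_append,
        pvWordStep (c :: cs.takeWhile (fun d => !pvSpecial d)) s (by simp) hword,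
        pvTokenize, if_neg hc, List.foldl_cons,
        pvMain (cs.dropWhile (fun d => !pvSpecial d)) _]
  termination_by l => l.length
  decreasing_by
    · simp
    · have := List.length_dropWhile_le (fun d => !pvSpecial d) cs
      simp
      omega

-- Nonempty input tokenizes to a nonempty token list.
theorem pvTokenize_ne_nil (c : Char) (cs : List Char) : pvTokenize (c :: cs) ≠ [] := by
  rw [pvTokenize]
  split_ifs <;> simp

theorem pvGetLast?_cons {α : Type} (a : α) (l : List α) (h : l ≠ []) :
    (a :: l).getLast? = l.getLast? := by
  cases l with
  | nil => exact absurd rfl h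
  | cons b bs => exact List.getLast?_cons_cons

-- The last token: a singleton of the last char if it is special, else a nonempty plain word.
theorem pvTok_last : ∀ (l : List Char) (c : Char), l.getLast? = some c →
    (pvSpecial c = true → (pvTokenize l).getLast? = some [c]) ∧
    (pvSpecial c = false → ∃ t, (pvTokenize l).getLast? = some t ∧ t ≠ [] ∧
      ∀ d ∈ t, pvSpecial d = false)
  | [], c, h => by simp at h
  | a :: as, c, h => by
    by_cases ha : pvSpecial a = true
    · rw [pvTokenize, if_pos ha]
      cases as with
      | nil =>
        simp at h
        subst h
        constructor
        · intro _; simp [pvTokenize]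
        · intro hfalse; rw [ha] at hfalse; cases hfalse
      | cons b bs =>
        rw [List.getLast?_cons_cons] at h
        have hres := pvTok_last (b :: bs) c h
        have hne := pvTokenize_ne_nil b bs
        rw [pvGetLast?_cons _ _ hne]
        exact hres
    · rw [pvTokenize, if_neg ha]
      have hword : ∀ d ∈ a :: as.takeWhile (fun d => !pvSpecial d), pvSpecial d = false := by
        intro d hd
        rcases List.mem_cons.mp hd with rfl | hd
        · simpa using ha
        · simpa using List.mem_takeWhile_imp hd
      cases hdrop : as.dropWhile (fun d => !pvSpecial d) with
      | nil =>
        -- the whole input is one word token; its last char is c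
        have hl : a :: as = a :: as.takeWhile (fun d => !pvSpecial d) := by
          conv_lhs => rw [← List.takeWhile_append_dropWhile (p := fun d => !pvSpecial d) (l := as)]
          rw [hdrop, List.append_nil]
        constructor
        · intro hs
          exfalso
          have hcmem : c ∈ a :: as := List.mem_of_getLast? h
          rw [hl] at hcmem
          have := hword c hcmem
          rw [hs] at this; cases this
        · intro _
          refine ⟨a :: as.takeWhile (fun d => !pvSpecial d), by simp [pvTokenize], by simp, hword⟩
      | cons b bs =>
        have hlast : (b :: bs).getLast? = some c := by
          have hsplit : a :: as = (a :: as.takeWhile (fun d => !pvSpecial d)) ++ (b :: bs) := by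
            rw [List.cons_append, ← hdrop, List.takeWhile_append_dropWhile]
          have h2 : (a :: as).getLast? = (b :: bs).getLast? := by
            rw [hsplit, List.getLast?_append_cons]
          rw [← h2, h]
        have hres := pvTok_last (b :: bs) c hlast
        have hne := pvTokenize_ne_nil b bs
        rw [pvGetLast?_cons _ _ hne]
        exact hres
  termination_by l => l.length
  decreasing_by
    · simp_all
    · have h1 := List.length_dropWhile_le (fun d => !pvSpecial d) as
      rw [hdrop] at h1
      simp at h1 ⊢
      omega

-- If the token list ends with a nonempty word token, the folded buffer absorbs it, so it is
-- nonempty.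
theorem pvBuf_ne_nil (toks : List (List Char)) (t : List Char)
    (hlast : toks.getLast? = some t) (hne : t ≠ [])
    (hw : ∀ d ∈ t, pvSpecial d = false) (s0 : PvStB) :
    (toks.foldl pvStepB s0).buf ≠ [] := by
  have htoks : toks ≠ [] := by rintro rfl; simp at hlast
  have hdecomp : toks = toks.dropLast ++ [t] := by
    conv_lhs => rw [← List.dropLast_append_getLast htoks]
    rw [List.getLast?_eq_some_getLast htoks] at hlast
    simp at hlast
    rw [hlast]
  rw [hdecomp, List.foldl_append, List.foldl_cons, List.foldl_nil]
  have hlb : t ≠ ['['] := by rintro rfl; exact absurd (hw '[' (by simp)) (by decide)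
  have hrb : t ≠ [']'] := by rintro rfl; exact absurd (hw ']' (by simp)) (by decide)
  have hco : t ≠ [':'] := by rintro rfl; exact absurd (hw ':' (by simp)) (by decide)
  have hsp : t ≠ [' '] := by rintro rfl; exact absurd (hw ' ' (by simp)) (by decide)
  simp [pvStepB, hlb, hrb, hco, hsp, hne]

-- ===== VERDICT (by name: the statement is the Claim_ definition above) =====
theorem annot_utt_to_labels_spec : Claim_equal_annot_utt_to_labels := by
  intro u _
  show annot_utt_to_labels u = annot_utt_to_labels_alt u
  simp only [annot_utt_to_labels, annot_utt_to_labels_alt]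
  have hinit : (⟨[], [], false, false, [], [], []⟩ : PvStA) = pvEmbed ⟨PvMode.O, [], [], [], [], []⟩ := rfl
  rw [hinit, pvEnumSplit u.toList 0 u.toList.length (pvEmbed ⟨PvMode.O, [], [], [], [], []⟩) (by simp),
    pvMain u.toList ⟨PvMode.O, [], [], [], [], []⟩]
  set s := (pvTokenize u.toList).foldl pvStepB ⟨PvMode.O, [], [], [], [], []⟩ with hs
  cases hl : u.toList.getLast? with
  | none =>
    have hnil : u.toList = [] := by
      cases h : u.toList with
      | nil => rfl
      | cons a as => rw [h] at hl; simp [List.getLast?_eq_getElem?] at hl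
    rw [hnil] at hs ⊢
    simp only [pvTokenize, List.getLast?_nil, pvOverride, pvFinishB]
    split_ifs <;> simp_all [pvEmbed]
  | some c =>
    have htl := pvTok_last u.toList c hl
    by_cases hc : pvSpecial c = true
    · -- last char special: A does not override; B's last token is special, emits pending
      have hts := htl.1 hc
      rw [hts]
      have hcs : c = '[' ∨ c = ']' ∨ c = ':' ∨ c = ' ' := by
        simp [pvSpecial, Bool.or_eq_true, beq_iff_eq] at hc
        tauto
      have hnotword : ¬ ([c] ≠ ['['] ∧ [c] ≠ [']'] ∧ [c] ≠ [':'] ∧ [c] ≠ [' ']) := by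
        rcases hcs with rfl | rfl | rfl | rfl <;> simp
      simp only [pvOverride, hc, pvFinishB, if_neg hnotword]
      split_ifs <;> simp_all [pvEmbed]
    · -- last char non-special: A overrides (curText := buffer, curLabel := 'O') and emits;
      -- B appends (buf, 'O') directly
      have hcf : pvSpecial c = false := by simpa using hc
      obtain ⟨t, ht, htne, htw⟩ := htl.2 hcf
      rw [ht]
      have hlb : t ≠ ['['] := by rintro rfl; exact absurd (htw '[' (by simp)) (by decide)
      have hrb : t ≠ [']'] := by rintro rfl; exact absurd (htw ']' (by simp)) (by decide)
      have hco : t ≠ [':'] := by rintro rfl; exact absurd (htw ':' (by simp)) (by decide)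
      have hsp : t ≠ [' '] := by rintro rfl; exact absurd (htw ' ' (by simp)) (by decide)
      have hbuf : s.buf ≠ [] := pvBuf_ne_nil _ t ht htne htw _
      simp [pvOverride, pvFinishB, pvEmbed, hcf, hbuf, hlb, hrb, hco, hsp]
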